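-- pv_equiv track=rewrite | github.com/jimkou/MovieFlix2020_E16064_Kourlos_Dimitris | final.py | actors_search
-- ===== SOURCE A (Python) =====
-- def actors_search(actors , actor):
--     counter = 0
--     actor_word = actor.split(" ")
--     for item in actors:
--         item_split = item.split(" ")
--         for i in item_split:
--             for j in actor_word:
--               if j.casefold().strip() ==  i.casefold().strip():
--                   counter = 1
--     if counter == 1:
--             return True
--     else:
--         return False
-- ===== SOURCE B (Python) =====
-- def actors_search(actors, actor):
--     all_words = {w.casefold().strip() for item in actors for w in item.split(" ")}
--     actor_words = {w.casefold().strip() for w in actor.split(" ")}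
--     return not actor_words.isdisjoint(all_words)
-- ===== Notes on version B (the rewrite author's own statement) =====
-- stated objective: faster
-- what changed: Replaces the triple-nested per-item word-comparison loop with two up-front hash sets of normalized words (one flattened over all entries, one for the actor) and a single set-disjointness test.
import Mathlib
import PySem

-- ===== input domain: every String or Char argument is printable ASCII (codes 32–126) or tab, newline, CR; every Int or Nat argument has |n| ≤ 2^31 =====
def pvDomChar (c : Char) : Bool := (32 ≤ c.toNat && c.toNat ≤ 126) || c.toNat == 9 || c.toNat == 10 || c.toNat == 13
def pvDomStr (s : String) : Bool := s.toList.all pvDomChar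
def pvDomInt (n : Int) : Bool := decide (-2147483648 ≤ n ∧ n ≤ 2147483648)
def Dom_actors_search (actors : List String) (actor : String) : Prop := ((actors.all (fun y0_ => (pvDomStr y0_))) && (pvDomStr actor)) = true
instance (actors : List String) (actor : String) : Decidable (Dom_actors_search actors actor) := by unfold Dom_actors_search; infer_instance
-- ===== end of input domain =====

-- B replaces A's triple-nested per-item scan by two up-front sets of normalized
-- words and one set-disjointness test (objective: simpler).
-- casefold() is ported as PySem.Str.lower: exact on the ASCII domain Dom_ admits.

-- s.split(" "): sep " " is nonempty, so split? is always `some`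
def pvSplitSp (s : String) : List String := (PySem.Str.split? s " ").getD []

-- ===== PORT A =====
def actors_search (actors : List String) (actor : String) : Bool :=
  let counter : Int := 0
  let actor_word := pvSplitSp actor
  let counter := actors.foldl (fun counter item =>
    let item_split := pvSplitSp item
    item_split.foldl (fun counter i =>
      actor_word.foldl (fun counter j =>
        if PySem.Str.strip (PySem.Str.lower j) == PySem.Str.strip (PySem.Str.lower i)
        then 1 else counter) counter) counter) counter
  if counter == 1 then true else false

-- ===== PORT B =====
-- w.casefold().strip() (ASCII-exact via lower)
def pvNorm (w : String) : String := PySem.Str.strip (PySem.Str.lower w)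

def actors_search_alt (actors : List String) (actor : String) : Bool :=
  let all_words : PySem.Set String :=
    PySem.Set.ofList (actors.flatMap (fun item => (pvSplitSp item).map pvNorm))
  let actor_words : PySem.Set String :=
    PySem.Set.ofList ((pvSplitSp actor).map pvNorm)
  !(PySem.Set.isdisjoint actor_words all_words)

-- ===== PRECONDITION & SPEC =====
def Spec_actors_search (actors : List String) (actor : String) (out : Bool) : Prop := out = actors_search_alt actors actor
instance (actors : List String) (actor : String) (out : Bool) : Decidable (Spec_actors_search actors actor out) := by unfold Spec_actors_search; infer_instance

-- ===== CLAIM (what is proved, stated in full; the proofs are below) =====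
def Claim_equal_actors_search : Prop := ∀ (actors : List String) (actor : String), Dom_actors_search actors actor → Spec_actors_search actors actor (actors_search actors actor)

-- ===== LEMMAS AND PROOFS =====

-- A's "set counter to 1 on a hit" fold is: 1 if any hit, else the start value.
theorem foldl_if_one {α : Type} (p : α → Bool) (l : List α) (c : Int) :
    l.foldl (fun c x => if p x then 1 else c) c = if l.any p then 1 else c := by
  induction l generalizing c with
  | nil => simp
  | cons a t ih => by_cases h : p a <;> simp [List.foldl_cons, h, ih]

theorem actors_search_eq_any (actors : List String) (actor : String) :
    actors_search actors actor =
      actors.any (fun item => (pvSplitSp item).any (fun i =>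
        (pvSplitSp actor).any (fun j => pvNorm j == pvNorm i))) := by
  unfold actors_search
  simp only [foldl_if_one, pvNorm]
  by_cases h : actors.any (fun item => (pvSplitSp item).any (fun i =>
      (pvSplitSp actor).any (fun j =>
        PySem.Str.strip (PySem.Str.lower j) == PySem.Str.strip (PySem.Str.lower i)))) <;>
    simp [h]

theorem actors_search_alt_true_iff (actors : List String) (actor : String) :
    actors_search_alt actors actor = true ↔
      ∃ j ∈ pvSplitSp actor, ∃ item ∈ actors, ∃ i ∈ pvSplitSp item, pvNorm j = pvNorm i := by
  simp only [actors_search_alt, Bool.not_eq_true']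
  rw [Bool.eq_false_iff, Ne, PySem.Set.isdisjoint_iff]
  push Not
  simp only [PySem.Set.mem_ofList, List.mem_map, List.mem_flatMap]
  constructor
  · rintro ⟨x, ⟨j, hj, rfl⟩, item, hitem, i, hi, hE⟩
    exact ⟨j, hj, item, hitem, i, hi, hE.symm⟩
  · rintro ⟨j, hj, item, hitem, i, hi, hE⟩
    exact ⟨pvNorm j, ⟨j, hj, rfl⟩, item, hitem, i, hi, hE.symm⟩

theorem actors_search_spec : Claim_equal_actors_search := by
  intro actors actor _
  show actors_search actors actor = actors_search_alt actors actor
  rw [actors_search_eq_any, Bool.eq_iff_iff, actors_search_alt_true_iff]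
  simp only [List.any_eq_true, beq_iff_eq]
  constructor
  · rintro ⟨item, hitem, i, hi, j, hj, hE⟩
    exact ⟨j, hj, item, hitem, i, hi, hE⟩
  · rintro ⟨j, hj, item, hitem, i, hi, hE⟩
    exact ⟨item, hitem, i, hi, j, hj, hE⟩
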